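-- pv_equiv track=rewrite | github.com/CRowland4/static_site_generator | src/textnode.py | is_block_ordered_list
-- ===== SOURCE A (Python) =====
-- def is_block_ordered_list(markdown_block: str) -> bool:
--     lines = markdown_block.split("\n")
--
--     nums = []
--     for line in lines:
--         line_split = line.split(".")
--         if not line_split:
--             return False
--         if not line_split[0].isnumeric():
--             return False
--
--         nums.append(int(line_split[0]))
--
--     return all([nums[i - 1] == nums[i] - 1 for i in range(1, len(nums))])
-- ===== SOURCE B (Python) =====
-- def is_block_ordered_list(markdown_block: str) -> bool:
--     prev = None
--     for line in markdown_block.split("\n"):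
--         head = line.split(".")[0]
--         if not head.isnumeric():
--             return False
--         n = int(head)
--         if prev is not None and n != prev + 1:
--             return False
--         prev = n
--     return True
-- ===== Notes on version B (the rewrite author's own statement) =====
-- stated objective: simpler
-- what changed: B fuses everything into one pass that keeps only the previously parsed number (an Optional) and exits early, instead of A's two phases: building the full nums list and then checking all adjacent pairs with an index comprehension.
import Mathlib
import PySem

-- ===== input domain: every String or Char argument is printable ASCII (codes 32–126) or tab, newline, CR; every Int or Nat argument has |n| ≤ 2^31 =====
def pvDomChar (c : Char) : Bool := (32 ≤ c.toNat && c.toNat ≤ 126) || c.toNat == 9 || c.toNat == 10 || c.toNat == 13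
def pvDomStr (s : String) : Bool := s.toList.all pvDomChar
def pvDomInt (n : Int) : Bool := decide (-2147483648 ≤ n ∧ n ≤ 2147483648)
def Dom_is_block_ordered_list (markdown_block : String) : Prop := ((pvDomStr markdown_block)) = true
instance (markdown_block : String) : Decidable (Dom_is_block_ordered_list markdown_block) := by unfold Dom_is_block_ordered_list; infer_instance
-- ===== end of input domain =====

-- B replaces A's two phases (collect all leading numbers into a list, then check every
-- adjacent pair by index) with one fused pass keeping only the previous number (Option Int).
-- Python's str.isnumeric is ported as PySem.Str.strIsdigit: on the printable-ASCII domain the two agree.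

-- ===== PORT A =====
-- the for-loop of A: accumulates nums, returns none where A returns False early
def pvCollectA : List String → List Int → Option (List Int)
  | [], nums => some nums
  | line :: rest, nums =>
    let line_split := (PySem.Str.split? line ".").getD []
    if line_split.isEmpty then none                               -- 'if not line_split: return False'
    else if !PySem.Str.strIsdigit ((PySem.List.pyGet? line_split 0).getD "") then none
    else pvCollectA rest (nums ++ [(PySem.Int.ofStr? ((PySem.List.pyGet? line_split 0).getD "")).getD 0])
      -- int(line_split[0]); ofStr? is some here since the string passed isnumeric

def is_block_ordered_list (markdown_block : String) : Bool :=
  let lines := (PySem.Str.split? markdown_block "\n").getD []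
  match pvCollectA lines [] with
  | none => false
  | some nums =>
    ((PySem.List.pyRange 1 (nums.length : Int) 1).map
      (fun i => decide (PySem.List.pyGetD nums (i - 1) 0 = PySem.List.pyGetD nums i 0 - 1))).all id

-- ===== PORT B =====
def pvGoB : List String → Option Int → Bool
  | [], _ => true
  | line :: rest, prev =>
    let head := (PySem.List.pyGet? ((PySem.Str.split? line ".").getD []) 0).getD ""   -- line.split(".")[0]
    if !PySem.Str.strIsdigit head then false
    else
      let n := (PySem.Int.ofStr? head).getD 0                     -- int(head), some since head isnumeric
      match prev with
      | some p => if n ≠ p + 1 then false else pvGoB rest (some n)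
      | none => pvGoB rest (some n)

def is_block_ordered_list_alt (markdown_block : String) : Bool :=
  pvGoB ((PySem.Str.split? markdown_block "\n").getD []) none

-- ===== PRECONDITION & SPEC =====
def Spec_is_block_ordered_list (markdown_block : String) (out : Bool) : Prop := out = is_block_ordered_list_alt markdown_block
instance (markdown_block : String) (out : Bool) : Decidable (Spec_is_block_ordered_list markdown_block out) := by unfold Spec_is_block_ordered_list; infer_instance

-- ===== CLAIM (what is proved, stated in full; the proofs are below) =====
def Claim_equal_is_block_ordered_list : Prop := ∀ (markdown_block : String), Dom_is_block_ordered_list markdown_block → Spec_is_block_ordered_list markdown_block (is_block_ordered_list markdown_block)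

-- ===== LEMMAS AND PROOFS =====

-- proof-side: the leading token before the first '.', and a clean parse of all lines
def pvHead (line : String) : String := (PySem.List.pyGet? ((PySem.Str.split? line ".").getD []) 0).getD ""

def pvParse : List String → Option (List Int)
  | [] => some []
  | line :: rest =>
    if !PySem.Str.strIsdigit (pvHead line) then none
    else (pvParse rest).map (fun ns => (PySem.Int.ofStr? (pvHead line)).getD 0 :: ns)

-- proof-side: B's chain check on the parsed numbers
def pvChain : Option Int → List Int → Bool
  | _, [] => true
  | none, n :: r => pvChain (some n) r
  | some p, n :: r => (n == p + 1) && pvChain (some n) r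

theorem pvCollectA_eq (lines : List String) (nums : List Int) :
    pvCollectA lines nums = (pvParse lines).map (nums ++ ·) := by
  induction lines generalizing nums with
  | nil => simp [pvCollectA, pvParse]
  | cons line rest ih =>
    by_cases he : ((PySem.Str.split? line ".").getD []).isEmpty
    · have hh : pvHead line = "" := by
        simp [pvHead, List.isEmpty_iff.mp he, PySem.List.pyGet?]
      have hF : PySem.Chars.strIsdigit ([] : List Char) = false := by decide
      simp [pvCollectA, pvParse, he, hh, hF]
    · by_cases hd : PySem.Str.strIsdigit (pvHead line)
      · simp only [pvHead] at hd
        simp at hd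
        simp [pvCollectA, pvParse, he, pvHead, hd, ih]
        cases pvParse rest <;> simp
      · simp only [pvHead] at hd
        simp at hd
        simp [pvCollectA, pvParse, he, pvHead, hd]

theorem pvGoB_eq (lines : List String) (prev : Option Int) :
    pvGoB lines prev = match pvParse lines with
      | none => false
      | some ns => pvChain prev ns := by
  induction lines generalizing prev with
  | nil => simp [pvGoB, pvParse, pvChain]
  | cons line rest ih =>
    by_cases hd : PySem.Str.strIsdigit (pvHead line)
    · simp only [pvHead] at hd
      simp at hd
      cases prev with
      | none =>
        simp [pvGoB, pvParse, pvHead, hd, ih]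
        cases pvParse rest <;> simp [pvChain]
      | some p =>
        by_cases hn : (PySem.Int.ofStr? (pvHead line)).getD 0 = p + 1
        · simp only [pvHead] at hn
          simp [pvGoB, pvParse, pvHead, hd, hn, ih]
          cases pvParse rest <;> simp [pvChain]
        · simp only [pvHead] at hn
          simp [pvGoB, pvParse, pvHead, hd, hn]
          cases pvParse rest <;> simp [pvChain, hn]
    · simp only [pvHead] at hd
      simp at hd
      simp [pvGoB, pvParse, pvHead, hd]

theorem pvChain_some_iff (ns : List Int) (p : Int) :
    pvChain (some p) ns = true ↔ List.IsChain (fun a b => b = a + 1) (p :: ns) := by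
  induction ns generalizing p with
  | nil => simp [pvChain]
  | cons n r ih =>
    simp only [pvChain, Bool.and_eq_true, beq_iff_eq, ih, List.isChain_cons_cons]

theorem pvChain_none_iff (ns : List Int) :
    pvChain none ns = true ↔ List.IsChain (fun a b => b = a + 1) ns := by
  cases ns with
  | nil => simp [pvChain]
  | cons n r => simpa [pvChain] using pvChain_some_iff r n

theorem pairs_iff (nums : List Int) :
    (((PySem.List.pyRange 1 (nums.length : Int) 1).map
      (fun i => decide (PySem.List.pyGetD nums (i - 1) 0 = PySem.List.pyGetD nums i 0 - 1))).all id = true)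
    ↔ List.IsChain (fun a b : Int => b = a + 1) nums := by
  rw [List.isChain_iff_getElem]
  simp only [List.all_eq_true, List.forall_mem_map, PySem.List.mem_pyRange_one, id_eq,
    decide_eq_true_eq]
  constructor
  · intro h i hi
    have hx := h ((i : Int) + 1) ⟨by omega, by omega⟩
    rw [PySem.List.pyGetD_eq_getElem nums 0 (by omega) (by omega),
        PySem.List.pyGetD_eq_getElem nums 0 (by omega) (by omega)] at hx
    have e1 : ((i : Int) + 1 - 1).toNat = i := by omega
    have e2 : ((i : Int) + 1).toNat = i + 1 := by omega
    simp only [e1, e2] at hx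
    omega
  · intro h i hi
    obtain ⟨h1, h2⟩ := hi
    have hk : (i - 1).toNat + 1 < nums.length := by omega
    have hx := h (i - 1).toNat hk
    rw [PySem.List.pyGetD_eq_getElem nums 0 (by omega) (by omega),
        PySem.List.pyGetD_eq_getElem nums 0 (by omega) (by omega)]
    have e2 : i.toNat = (i - 1).toNat + 1 := by omega
    simp only [e2]
    omega

theorem ports_agree (s : String) : is_block_ordered_list s = is_block_ordered_list_alt s := by
  simp only [is_block_ordered_list, is_block_ordered_list_alt]
  rw [pvCollectA_eq, pvGoB_eq]
  cases hp : pvParse ((PySem.Str.split? s "\n").getD []) with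
  | none => simp
  | some nums =>
    simp only [Option.map_some, List.nil_append]
    rw [Bool.eq_iff_iff, pairs_iff, pvChain_none_iff]

-- ===== VERDICT (by name: the statement is the Claim_ definition above) =====
theorem is_block_ordered_list_spec : Claim_equal_is_block_ordered_list := by
  intro s _
  unfold Spec_is_block_ordered_list
  exact ports_agree s
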